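-- pv_equiv track=rewrite | github.com/dafdaf1234444/swarm | tools/archive/f_gam3_signal_contract.py | suppress_same_session_status_noops
-- ===== SOURCE A (Python) =====
-- def suppress_same_session_status_noops(rows: list[dict[str, str]]) -> tuple[list[dict[str, str]], dict[str, int]]:
--     """Collapse repeated same lane/session/status rows and keep latest details.
--
--     This treats repeated same-session status appends as no-op lifecycle churn for
--     pickup/lag analysis while preserving the latest row payload for that tuple.
--     """
--     latest_by_key: dict[tuple[str, str, str], dict[str, str]] = {}
--     key_order: list[tuple[str, str, str]] = []
--     suppressed = 0
--
--     for row in rows: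
--         key = (
--             row.get("lane", "").strip(),
--             row.get("session", "").strip(),
--             row.get("status", "").strip().upper(),
--         )
--         if key in latest_by_key:
--             suppressed += 1
--             latest_by_key[key] = row
--             continue
--         key_order.append(key)
--         latest_by_key[key] = row
--
--     return (
--         [latest_by_key[key] for key in key_order],
--         {
--             "input_row_count": len(rows),
--             "output_row_count": len(key_order),
--             "suppressed_row_count": suppressed,
--         },
--     )
-- ===== SOURCE B (Python) =====
-- def suppress_same_session_status_noops(rows: list[dict[str, str]]) -> tuple[list[dict[str, str]], dict[str, int]]:
--     """Collapse repeated same lane/session/status rows and keep latest details.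
--
--     Staged algorithm: compute the key list, dedup it for first-seen order,
--     then for each distinct key scan the rows backwards for its latest payload.
--     """
--     def _key(row: dict[str, str]) -> tuple[str, str, str]:
--         return (
--             row.get("lane", "").strip(),
--             row.get("session", "").strip(),
--             row.get("status", "").strip().upper(),
--         )
--
--     keys = [_key(row) for row in rows]
--     order = list(dict.fromkeys(keys))
--     collapsed = [
--         next(row for k2, row in zip(reversed(keys), reversed(rows)) if k2 == k)
--         for k in order
--     ]
--     return (
--         collapsed,
--         {
--             "input_row_count": len(rows),
--             "output_row_count": len(order),
--             "suppressed_row_count": len(rows) - len(order),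
--         },
--     )
-- ===== Notes on version B (the rewrite author's own statement) =====
-- stated objective: alternative
-- what changed: Replaces the single-pass dict-of-latest-payloads with a staged algorithm: build the key list, dedup it (dict.fromkeys) for first-seen order, then for each distinct key do a backward linear scan over the rows to fetch its latest payload; counts are derived arithmetically from the two lengths.
import Mathlib
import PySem

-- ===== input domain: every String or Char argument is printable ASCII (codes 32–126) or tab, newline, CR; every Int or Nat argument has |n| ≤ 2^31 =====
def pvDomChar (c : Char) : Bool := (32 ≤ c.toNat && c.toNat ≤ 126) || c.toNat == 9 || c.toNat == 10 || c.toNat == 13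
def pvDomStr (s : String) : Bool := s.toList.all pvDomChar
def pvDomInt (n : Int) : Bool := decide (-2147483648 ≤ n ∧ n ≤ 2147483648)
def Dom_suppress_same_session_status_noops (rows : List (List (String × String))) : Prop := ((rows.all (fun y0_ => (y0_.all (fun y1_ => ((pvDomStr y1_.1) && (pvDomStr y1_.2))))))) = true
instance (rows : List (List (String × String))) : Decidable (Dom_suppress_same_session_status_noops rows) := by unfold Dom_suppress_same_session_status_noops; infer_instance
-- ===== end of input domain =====

-- B is an alternative algorithm: dedup the key list for first-seen order, then fetch each key's latest payload by a backward scan — no payload dict; counts derived from the two lengths. Return-value equivalence is proved (neither mutates its argument).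

-- shared helper: the (lane, session, STATUS) key both Pythons compute per row
def pvKey (row : List (String × String)) : String × String × String :=
  (PySem.Str.strip ((PySem.Dict.mk row).getD "lane" ""),
   PySem.Str.strip ((PySem.Dict.mk row).getD "session" ""),
   PySem.Str.upper (PySem.Str.strip ((PySem.Dict.mk row).getD "status" "")))

-- ===== PORT A =====
def suppress_same_session_status_noops (rows : List (List (String × String))) : (List (List (String × String))) × (List (String × Int)) :=
  let st := rows.foldl
    (fun (st : PySem.Dict (String × String × String) (List (String × String)) × List (String × String × String) × Int) row =>
      let key := pvKey row
      if st.1.contains key then (st.1.insert key row, st.2.1, st.2.2 + 1)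
      else (st.1.insert key row, st.2.1 ++ [key], st.2.2))
    (PySem.Dict.empty, [], 0)
  (st.2.1.map (fun k => st.1.getD k []),   -- latest_by_key[key]; every key in key_order was inserted, so the default is never used
   [("input_row_count", (rows.length : Int)),
    ("output_row_count", (st.2.1.length : Int)),
    ("suppressed_row_count", st.2.2)])

-- ===== PORT B =====
def suppress_same_session_status_noops_alt (rows : List (List (String × String))) : (List (List (String × String))) × (List (String × Int)) :=
  let keys := rows.map pvKey
  let order := PySem.List.dedup keys          -- list(dict.fromkeys(keys))
  let collapsed := order.map (fun k =>
    (((keys.reverse.zip rows.reverse).find? (fun p => p.1 == k)).map (·.2)).getD [])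
    -- next(row for k2, row in zip(reversed(keys), reversed(rows)) if k2 == k); k ∈ keys so the .getD default is never used
  (collapsed,
   [("input_row_count", (rows.length : Int)),
    ("output_row_count", (order.length : Int)),
    ("suppressed_row_count", (rows.length : Int) - (order.length : Int))])

-- ===== PRECONDITION & SPEC =====
def Spec_suppress_same_session_status_noops (rows : List (List (String × String))) (out : (List (List (String × String))) × (List (String × Int))) : Prop := out = suppress_same_session_status_noops_alt rows
instance (rows : List (List (String × String))) (out : (List (List (String × String))) × (List (String × Int))) : Decidable (Spec_suppress_same_session_status_noops rows out) := by unfold Spec_suppress_same_session_status_noops; infer_instance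

-- ===== CLAIM (what is proved, stated in full; the proofs are below) =====
def Claim_equal_suppress_same_session_status_noops : Prop := ∀ (rows : List (List (String × String))), Dom_suppress_same_session_status_noops rows → Spec_suppress_same_session_status_noops rows (suppress_same_session_status_noops rows)

-- ===== LEMMAS AND PROOFS =====

-- A's loop state (dict, key_order, suppressed) is determined by the plain insert-fold dict.
lemma pv_loop_inv (l : List (List (String × String)))
    (d : PySem.Dict (String × String × String) (List (String × String)))
    (order : List (String × String × String)) (s : Int)
    (ho : order = d.keys) (hnd : d.keys.Nodup) :
    l.foldl
      (fun (st : PySem.Dict (String × String × String) (List (String × String)) × List (String × String × String) × Int) row =>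
        let key := pvKey row
        if st.1.contains key then (st.1.insert key row, st.2.1, st.2.2 + 1)
        else (st.1.insert key row, st.2.1 ++ [key], st.2.2))
      (d, order, s)
    = (let d' := l.foldl (fun d row => d.insert (pvKey row) row) d
       (d', d'.keys, s + (l.length : Int) - ((d'.size : Int) - (d.size : Int)))) := by
  induction l generalizing d order s with
  | nil => simp [ho]
  | cons row t ih =>
    simp only [List.foldl_cons]
    by_cases hc : d.contains (pvKey row) = true
    · rw [if_pos hc]
      rw [ih (d.insert (pvKey row) row) order (s + 1)
        (by rw [ho, PySem.Dict.keys_insert_of_contains _ _ hc])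
        (PySem.Dict.nodup_keys_insert _ _ _ hnd)]
      simp only
      congr 1
      congr 1
      rw [PySem.Dict.size_insert]
      simp [hc, List.length_cons]
      ring
    · rw [if_neg hc]
      rw [ih (d.insert (pvKey row) row) (order ++ [pvKey row]) s
        (by rw [ho, PySem.Dict.keys_insert_of_not_contains _ _ (by simpa using hc)])
        (PySem.Dict.nodup_keys_insert _ _ _ hnd)]
      simp only
      congr 1
      congr 1
      rw [PySem.Dict.size_insert]
      simp [hc, List.length_cons]
      ring

-- The insert-fold dict looks up to the LAST row with the given key (or falls through to d0).
lemma pv_get_fold (l : List (List (String × String)))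
    (d0 : PySem.Dict (String × String × String) (List (String × String)))
    (k : String × String × String) :
    (l.foldl (fun d row => d.insert (pvKey row) row) d0).get? k
      = (l.reverse.find? (fun r => pvKey r == k)).or (d0.get? k) := by
  induction l generalizing d0 with
  | nil => simp
  | cons row t ih =>
    simp only [List.foldl_cons, List.reverse_cons, List.find?_append]
    rw [ih]
    by_cases hk : pvKey row = k
    · simp [PySem.Dict.get?_insert_self, hk]
    · rw [PySem.Dict.get?_insert_of_ne _ _ (Ne.symm hk)]
      simp [hk]

-- ===== VERDICT (by name: the statement is the Claim_ definition above) =====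
theorem suppress_same_session_status_noops_spec : Claim_equal_suppress_same_session_status_noops := by
  intro rows _
  unfold Spec_suppress_same_session_status_noops
  unfold suppress_same_session_status_noops suppress_same_session_status_noops_alt
  rw [pv_loop_inv rows PySem.Dict.empty [] 0 (by simp) (by simp)]
  simp only
  set d' := rows.foldl (fun d row => d.insert (pvKey row) row) PySem.Dict.empty with hd'
  have hkeys : d'.keys = PySem.List.dedup (rows.map pvKey) := by
    rw [hd', PySem.Dict.keys_foldl_insert_key]
    simp only [PySem.Dict.keys_empty, PySem.Set.update, PySem.List.dedup_eq_ofList]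
    exact (PySem.Set.ofList_eq_foldl _).symm
  have hsize : (d'.size : Int) = ((PySem.List.dedup (rows.map pvKey)).length : Int) := by
    have : d'.size = d'.keys.length := by simp [PySem.Dict.keys, PySem.Dict.size]
    rw [this, hkeys]
  have hlookup : ∀ k, d'.getD k []
      = ((((rows.map pvKey).reverse.zip rows.reverse).find? (fun p => p.1 == k)).map (·.2)).getD [] := by
    intro k
    have hz : (rows.map pvKey).reverse.zip rows.reverse
        = (rows.reverse.map (fun r => (pvKey r, r))) := by
      rw [← List.map_reverse]
      simpa using List.zip_map' (f := pvKey) (g := id) (l := rows.reverse)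
    rw [PySem.Dict.getD_eq_get?_getD, hd', pv_get_fold]
    simp only [PySem.Dict.get?_empty, Option.or_none]
    rw [hz, List.find?_map]
    simp only [Function.comp_def]
    cases rows.reverse.find? (fun r => pvKey r == k) <;> rfl
  refine Prod.ext ?_ ?_
  · simp only [hkeys]
    exact List.map_congr_left (fun k _ => hlookup k)
  · simp [hkeys, hsize, PySem.Dict.size_empty]
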